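-- pv_equiv track=rewrite | github.com/Elvino00/PythonTestFiles | Server.py | is_str_correct
-- ===== SOURCE A (Python) =====
-- def is_str_correct(str):
--     if str[len(str)-1] == "-" or str[len(str)-1] == ",":
--         return False
--
--     for i in range(0, len(str)):
--         if i == len(str)-1 and (str[i] != ',' or str[i] != '-'):
--             return True
--         if(str[i] == str[i+1] and (str[i] == ',' or str[i] == '-')):
--             return False
--         if(str[i] == ',' and str[i+1] == "-"):
--             return False
--     return False
-- ===== SOURCE B (Python) =====
-- def is_str_correct(str):
--     if str[-1] in ',-':
--         return False
--     return not any(bad in str for bad in (',,', '--', ',-'))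
-- ===== Notes on version B (the rewrite author's own statement) =====
-- stated objective: idiomatic
-- what changed: Replaced the index-based scan with early returns by a last-character membership test plus substring containment tests for the three forbidden adjacent pairs: double comma, double dash, comma-then-dash.
import Mathlib
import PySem

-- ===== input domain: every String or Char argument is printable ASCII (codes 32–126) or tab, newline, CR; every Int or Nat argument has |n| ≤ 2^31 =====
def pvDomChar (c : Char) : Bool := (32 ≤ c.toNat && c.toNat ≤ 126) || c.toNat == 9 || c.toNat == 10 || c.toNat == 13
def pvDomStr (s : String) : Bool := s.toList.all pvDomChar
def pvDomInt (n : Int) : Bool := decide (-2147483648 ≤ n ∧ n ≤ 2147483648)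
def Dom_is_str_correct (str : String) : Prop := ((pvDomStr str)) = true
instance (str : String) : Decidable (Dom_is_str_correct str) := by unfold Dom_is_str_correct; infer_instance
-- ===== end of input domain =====

-- B replaces A's index loop with a last-character test plus substring checks for the three
-- forbidden pairs (idiomatic); equal return values on every non-empty string (both raise on "").

-- ===== PORT A =====
-- for i in range(0, len(str)): with early returns, as index recursion.
-- cs.getD (i+1) ' ' is only evaluated when i+1 < cs.length (the i = len-1 branch returns first),
-- so the default is never the compared value on reachable paths.
def isStrCorrectLoopA (cs : List Char) (i : Nat) : Bool :=
  if _h : i < cs.length then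
    if i = cs.length - 1 ∧ (cs.getD i ' ' ≠ ',' ∨ cs.getD i ' ' ≠ '-') then true
    else if cs.getD i ' ' = cs.getD (i+1) ' ' ∧ (cs.getD i ' ' = ',' ∨ cs.getD i ' ' = '-') then false
    else if cs.getD i ' ' = ',' ∧ cs.getD (i+1) ' ' = '-' then false
    else isStrCorrectLoopA cs (i+1)
  else false
termination_by cs.length - i

def is_str_correct (str : String) : Bool :=
  match PySem.Str.pyGet? str ((PySem.Str.len str) - 1) with
  | none => false   -- IndexError on "" ; excluded by Pre_
  | some c =>
    if c = '-' ∨ c = ',' then false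
    else isStrCorrectLoopA str.toList 0

-- ===== PORT B =====
def is_str_correct_alt (str : String) : Bool :=
  match PySem.Str.pyGet? str (-1) with
  | none => false   -- IndexError on "" ; excluded by Pre_
  | some c =>
    if c = ',' ∨ c = '-' then false
    else !(PySem.Str.isIn ",," str || PySem.Str.isIn "--" str || PySem.Str.isIn ",-" str)

-- ===== PRECONDITION & SPEC =====
-- A (and B) raise IndexError on the empty string; Pre_ excludes exactly that input.
def Pre_is_str_correct (str : String) : Prop := str ≠ ""
instance (str : String) : Decidable (Pre_is_str_correct str) := by unfold Pre_is_str_correct; infer_instance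
def pvWitness_is_str_correct : String := "ab"

def Spec_is_str_correct (str : String) (out : Bool) : Prop := out = is_str_correct_alt str
instance (str : String) (out : Bool) : Decidable (Spec_is_str_correct str out) := by unfold Spec_is_str_correct; infer_instance

-- ===== CLAIM (what is proved, stated in full; the proofs are below) =====
def Claim_equal_is_str_correct : Prop := ∀ (str : String), Dom_is_str_correct str → Pre_is_str_correct str → Spec_is_str_correct str (is_str_correct str)

-- ===== LEMMAS AND PROOFS =====

-- adjacent-pair characterisation of A's loop
def isStrCorrectNoBad : List Char → Bool
  | a :: b :: rest =>
      if a = b ∧ (a = ',' ∨ a = '-') then false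
      else if a = ',' ∧ b = '-' then false
      else isStrCorrectNoBad (b :: rest)
  | _ => true

lemma char_ne_comma_or_ne_dash (c : Char) : c ≠ ',' ∨ c ≠ '-' := by
  by_cases h : c = ','
  · right; simp [h]
  · left; exact h

lemma loopA_eq_noBad (cs : List Char) :
    ∀ n i, cs.length - i = n → i < cs.length → isStrCorrectLoopA cs i = isStrCorrectNoBad (cs.drop i) := by
  intro n
  induction n with
  | zero => intro i hn hi; omega
  | succ n ih =>
    intro i hn hi
    rw [isStrCorrectLoopA, dif_pos hi]
    by_cases hlast : i = cs.length - 1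
    · have hdrop : cs.drop i = [cs[i]] := by
        have : cs.drop i = cs[i] :: cs.drop (i+1) := (List.drop_eq_getElem_cons hi)
        rw [this, List.drop_eq_nil_of_le (by omega)]
      rw [if_pos ⟨hlast, char_ne_comma_or_ne_dash _⟩, hdrop]
      rfl
    · have hi1 : i + 1 < cs.length := by omega
      have hdrop : cs.drop i = cs[i] :: cs[i+1] :: cs.drop (i+2) := by
        rw [List.drop_eq_getElem_cons hi, List.drop_eq_getElem_cons hi1]
      have hgi : cs.getD i ' ' = cs[i] := List.getD_eq_getElem cs ' ' hi
      have hgi1 : cs.getD (i+1) ' ' = cs[i+1] := List.getD_eq_getElem cs ' ' hi1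
      rw [if_neg (by intro h; exact hlast h.1), hgi, hgi1, hdrop]
      have hrec : isStrCorrectLoopA cs (i+1) = isStrCorrectNoBad (cs.drop (i+1)) :=
        ih (i+1) (by omega) hi1
      have hdrop1 : cs.drop (i+1) = cs[i+1] :: cs.drop (i+2) := List.drop_eq_getElem_cons hi1
      rw [isStrCorrectNoBad]
      split_ifs with h1 h2
      · rfl
      · rfl
      · rw [hrec, hdrop1]

lemma noBad_eq_false_iff (cs : List Char) :
    isStrCorrectNoBad cs = false ↔
      ([',', ','] <:+: cs ∨ ['-', '-'] <:+: cs ∨ [',', '-'] <:+: cs) := by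
  induction cs with
  | nil => simp [isStrCorrectNoBad]
  | cons a l ih =>
    cases l with
    | nil =>
      simp [isStrCorrectNoBad, List.infix_cons_iff, List.cons_prefix_cons]
    | cons b rest =>
      rw [isStrCorrectNoBad]
      constructor
      · intro h
        split_ifs at h with h1 h2
        · obtain ⟨hab, hcd⟩ := h1
          subst hab
          rcases hcd with hc | hd
          · subst hc; left
            exact (List.cons_prefix_cons.mpr ⟨rfl, List.cons_prefix_cons.mpr ⟨rfl, List.nil_prefix⟩⟩).isInfix
          · subst hd; right; left
            exact (List.cons_prefix_cons.mpr ⟨rfl, List.cons_prefix_cons.mpr ⟨rfl, List.nil_prefix⟩⟩).isInfix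
        · obtain ⟨ha, hb⟩ := h2; subst ha; subst hb; right; right
          exact (List.cons_prefix_cons.mpr ⟨rfl, List.cons_prefix_cons.mpr ⟨rfl, List.nil_prefix⟩⟩).isInfix
        · rcases (ih.mp h) with h' | h' | h'
          · exact Or.inl (h'.trans (List.suffix_cons a (b :: rest)).isInfix)
          · exact Or.inr (Or.inl (h'.trans (List.suffix_cons a (b :: rest)).isInfix))
          · exact Or.inr (Or.inr (h'.trans (List.suffix_cons a (b :: rest)).isInfix))
      · intro h
        split_ifs with h1 h2
        · rfl
        · rfl
        · apply ih.mpr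
          push_neg at h1 h2
          rcases h with h' | h' | h' <;> rcases List.infix_cons_iff.mp h' with hp | hs
          · obtain ⟨ha, hp'⟩ := List.cons_prefix_cons.mp hp
            obtain ⟨hb, -⟩ := List.cons_prefix_cons.mp hp'
            subst ha; subst hb
            exact absurd rfl (h1 rfl).1
          · exact Or.inl hs
          · obtain ⟨ha, hp'⟩ := List.cons_prefix_cons.mp hp
            obtain ⟨hb, -⟩ := List.cons_prefix_cons.mp hp'
            subst ha; subst hb
            exact absurd rfl (h1 rfl).2
          · exact Or.inr (Or.inl hs)
          · obtain ⟨ha, hp'⟩ := List.cons_prefix_cons.mp hp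
            obtain ⟨hb, -⟩ := List.cons_prefix_cons.mp hp'
            subst ha; subst hb
            exact absurd rfl (h2 rfl)
          · exact Or.inr (Or.inr hs)

lemma loopA_eq_not_isIn (cs : List Char) (h : cs ≠ []) :
    isStrCorrectLoopA cs 0 =
      !(PySem.Chars.isIn [',', ','] cs || PySem.Chars.isIn ['-', '-'] cs || PySem.Chars.isIn [',', '-'] cs) := by
  have h0 : 0 < cs.length := List.length_pos_iff.mpr h
  have := loopA_eq_noBad cs (cs.length - 0) 0 rfl h0
  rw [List.drop_zero] at this
  rw [this]
  by_cases hb : isStrCorrectNoBad cs = false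
  · rw [hb]
    rcases (noBad_eq_false_iff cs).mp hb with h' | h' | h'
    · rw [(PySem.Chars.isIn_iff_infix _ _).mpr h']; simp
    · rw [(PySem.Chars.isIn_iff_infix _ _).mpr h']; simp
    · rw [(PySem.Chars.isIn_iff_infix _ _).mpr h']; simp
  · have hT : isStrCorrectNoBad cs = true := by
      cases hx : isStrCorrectNoBad cs
      · exact absurd hx hb
      · rfl
    rw [hT]
    have h1 : ¬ ([',', ','] <:+: cs ∨ ['-', '-'] <:+: cs ∨ [',', '-'] <:+: cs) := by
      intro hc; exact hb ((noBad_eq_false_iff cs).mpr hc)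
    push_neg at h1
    rw [(PySem.Chars.isIn_eq_false_iff _ _).mpr h1.1, (PySem.Chars.isIn_eq_false_iff _ _).mpr h1.2.1,
        (PySem.Chars.isIn_eq_false_iff _ _).mpr h1.2.2]
    rfl

-- ===== VERDICT (by name: the statement is the Claim_ definition above) =====
theorem is_str_correct_spec : Claim_equal_is_str_correct := by
  intro str _hdom hpre
  unfold Spec_is_str_correct is_str_correct is_str_correct_alt
  have hne : str.toList ≠ [] := by
    simp only [ne_eq, String.toList_eq_nil_iff]
    exact hpre
  have hlast : ∃ c, str.toList.getLast? = some c := by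
    cases hx : str.toList.getLast? with
    | none => exact absurd (List.getLast?_eq_none_iff.mp hx) hne
    | some c => exact ⟨c, rfl⟩
  obtain ⟨c, hc⟩ := hlast
  have hA : PySem.Str.pyGet? str ((PySem.Str.len str) - 1) = some c := by
    have h0 : 0 < str.toList.length := List.length_pos_iff.mpr hne
    have hL : str.length = str.toList.length := String.length_toList.symm
    simp
    rw [show ((str.length : Int) - 1) = ((str.toList.length - 1 : Nat) : Int) by omega,
        PySem.List.pyGet?_natCast]
    rw [List.getLast?_eq_getElem?] at hc
    exact hc
  have hB : PySem.Str.pyGet? str (-1) = some c := by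
    simp
    rw [PySem.List.pyGet?_neg_one, hc]
  rw [hA, hB]
  dsimp only
  by_cases hcc : c = ',' ∨ c = '-'
  · rw [if_pos (Or.symm hcc), if_pos hcc]
  · rw [if_neg (fun h => hcc (Or.symm h)), if_neg hcc]
    rw [loopA_eq_not_isIn str.toList hne]
    simp [PySem.Str.isIn_eq]
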